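-- pv_equiv track=rewrite | github.com/omarkhaled-auto/agent-team-v18 | src/agent_team_v15/skills.py | _enforce_token_budget
-- ===== SOURCE A (Python) =====
-- _WORDS_PER_TOKEN = 0.75
--
-- def _estimate_tokens(text: str) -> int:
--     """Estimate token count from text (word-based approximation)."""
--     words = len(text.split())
--     return int(words / _WORDS_PER_TOKEN)
--
-- def _enforce_token_budget(content: str, max_tokens: int) -> str:
--     """Truncate content to fit within token budget.
--
--     Truncation priority (removes from bottom up):
--     1. Top Audit Findings / On Track (least critical)
--     2. Trend (nice-to-have)
--     3. Moderate / Gate Analysis (lower priority)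
--     4. High Priority / Priority Review Checklist
--     5. Critical / Hard Rejection Rules are NEVER truncated
--     """
--     if _estimate_tokens(content) <= max_tokens:
--         return content
--
--     lines = content.splitlines()
--     sections: list[tuple[str, int, int]] = []  # (name, start, end)
--     current_section = ""
--     section_start = 0
--
--     for i, line in enumerate(lines):
--         if line.strip().startswith("## "):
--             if current_section:
--                 sections.append((current_section, section_start, i))
--             current_section = line.strip()[3:].strip().lower()
--             section_start = i
--     if current_section:
--         sections.append((current_section, section_start, len(lines)))
--
--     # Truncation order: most expendable first
--     truncation_order = [
--         "top audit findings",
--         "on track",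
--         "trend",
--         "moderate",
--         "gate analysis",
--         "high priority",
--         "priority review checklist",
--         # Legacy section names
--         "gate history",
--         "weak quality dimensions",
--         "quality targets",
--         "top failure modes",
--     ]
--
--     for target in truncation_order:
--         if _estimate_tokens("\n".join(lines)) <= max_tokens:
--             break
--         for name, start, end in sections[:]:
--             if target in name:
--                 removed_size = end - start
--                 lines = lines[:start] + lines[end:]
--                 sections = [
--                     (n, s - removed_size if s > start else s,
--                      e - removed_size if e > start else e)
--                     for n, s, e in sections if n != name
--                 ]
--                 break
--
--     return "\n".join(lines)
-- ===== SOURCE B (Python) =====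
-- _WORDS_PER_TOKEN = 0.75
--
--
-- def _estimate_tokens(text: str) -> int:
--     """Estimate token count from text (word-based approximation)."""
--     words = len(text.split())
--     return int(words / _WORDS_PER_TOKEN)
--
--
-- _TRUNCATION_ORDER = [
--     "top audit findings",
--     "on track",
--     "trend",
--     "moderate",
--     "gate analysis",
--     "high priority",
--     "priority review checklist",
--     # Legacy section names
--     "gate history",
--     "weak quality dimensions",
--     "quality targets",
--     "top failure modes",
-- ]
--
--
-- def _enforce_token_budget(content: str, max_tokens: int) -> str:
--     """Truncate content to fit within token budget.
--
--     Staged: (1) parse into blocks, (2) compute the full drop schedule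
--     ignoring the budget, (3) decide by word arithmetic how many scheduled
--     drops are needed (tokens = int(words/0.75) = words*4//3), (4) rebuild.
--     """
--     if _estimate_tokens(content) <= max_tokens:
--         return content
--
--     # pass 1: a preamble block plus one block per '## ' section
--     blocks = []
--     name, block = "", []
--     for line in content.splitlines():
--         s = line.strip()
--         if s.startswith("## "):
--             blocks.append((name, block))
--             name, block = s[3:].strip().lower(), [line]
--         else:
--             block.append(line)
--     blocks.append((name, block))
--
--     # pass 2: the drop schedule (name, word count), budget not consulted
--     dropped = set()
--     schedule = []
--     for target in _TRUNCATION_ORDER: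
--         for n, ls in blocks:
--             if n not in dropped and target in n:
--                 dropped.add(n)
--                 schedule.append((n, sum(len(l.split()) for l in ls)))
--                 break
--
--     # pass 3: word arithmetic decides how many scheduled drops are needed
--     words = sum(len(l.split()) for _, ls in blocks for l in ls)
--     need = set()
--     for n, w in schedule:
--         if words * 4 // 3 <= max_tokens:
--             break
--         need.add(n)
--         words -= w
--
--     # pass 4: rebuild from the blocks that are not dropped
--     return "\n".join(l for n, ls in blocks if n not in need for l in ls)
-- ===== Notes on version B (the rewrite author's own statement) =====
-- stated objective: alternative
-- what changed: B replaces A's single loop that interleaves budget rechecks on the re-joined text with section splicing/reindexing by four staged passes: parse into blocks, precompute the whole drop schedule ignoring the budget, then decide how many scheduled drops are needed purely by integer word-count arithmetic (tokens = words*4//3) without ever re-joining or re-splitting the text, and finally rebuild once.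
import Mathlib
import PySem

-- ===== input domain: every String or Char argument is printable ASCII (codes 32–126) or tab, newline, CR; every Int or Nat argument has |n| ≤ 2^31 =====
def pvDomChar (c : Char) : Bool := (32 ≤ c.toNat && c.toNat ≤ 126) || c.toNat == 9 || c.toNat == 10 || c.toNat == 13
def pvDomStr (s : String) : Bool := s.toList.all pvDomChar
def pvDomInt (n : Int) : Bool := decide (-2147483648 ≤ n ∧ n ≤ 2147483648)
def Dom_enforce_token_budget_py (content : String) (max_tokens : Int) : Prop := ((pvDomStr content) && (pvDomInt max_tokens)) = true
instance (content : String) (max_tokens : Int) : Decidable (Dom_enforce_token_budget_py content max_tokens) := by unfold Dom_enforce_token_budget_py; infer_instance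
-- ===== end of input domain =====

-- B replaces A's interleaved budget-recheck/splice loop by staged passes: parse into blocks, a
-- budget-free drop schedule, then pure word-count arithmetic deciding how many scheduled drops
-- are needed; equivalence is proved for contents whose section names are pairwise distinct.


-- ===== PORT A =====
-- _estimate_tokens: int(words / 0.75) = (4 * words) // 3 exactly (0.75 is exact in binary and the
-- quotient's distance to the next integer is ≥ 1/3, far above double rounding error for any word
-- count reachable from a Dom-sized string).  Shared by both ports, as the Python helper is.
def estTokens (cs : List Char) : Int :=
  PySem.Int.floordiv (((PySem.Chars.split₀ cs).length : Int) * 4) 3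

-- the truncation_order literal (shared module constant)
def pyTruncationOrder : List (List Char) :=
  ["top audit findings".toList, "on track".toList, "trend".toList, "moderate".toList,
   "gate analysis".toList, "high priority".toList, "priority review checklist".toList,
   "gate history".toList, "weak quality dimensions".toList, "quality targets".toList,
   "top failure modes".toList]

-- the parse loop body of A: state (sections, current_section, section_start), input (i, line)
def stepA (st : List (List Char × Int × Int) × List Char × Int) (il : Int × List Char) :
    List (List Char × Int × Int) × List Char × Int :=
  let ls := PySem.Chars.strip il.2
  if PySem.Chars.startswith ls ("## ".toList) then
    ((if st.2.1 ≠ [] then st.1 ++ [(st.2.1, st.2.2, il.1)] else st.1),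
     PySem.Chars.lower (PySem.Chars.strip (PySem.List.slice ls (some 3) none)),
     il.1)
  else st

-- inner 'for name, start, end in sections[:]: if target in name: …; break' — first match
def findSecA (target : List Char) : List (List Char × Int × Int) → Option (List Char × Int × Int)
  | [] => none
  | sec :: rest => if PySem.Chars.isIn target sec.1 then some sec else findSecA target rest

-- outer 'for target in truncation_order' loop with its break and splice/reindex
def truncA (max_tokens : Int) : List (List Char) → List (List Char) →
    List (List Char × Int × Int) → List (List Char) × List (List Char × Int × Int)
  | [], lines, sections => (lines, sections)
  | t :: ts, lines, sections =>
    if estTokens (PySem.Chars.join ("\n".toList) lines) ≤ max_tokens then (lines, sections)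
    else
      match findSecA t sections with
      | none => truncA max_tokens ts lines sections
      | some (name, s, e) =>
        let removed := e - s
        let lines' := PySem.List.slice lines none (some s) ++ PySem.List.slice lines (some e) none
        let sections' := (sections.filter (fun sec => sec.1 ≠ name)).map
          (fun sec => (sec.1, if sec.2.1 > s then sec.2.1 - removed else sec.2.1,
                       if sec.2.2 > s then sec.2.2 - removed else sec.2.2))
        truncA max_tokens ts lines' sections'

def enforce_token_budget_py (content : String) (max_tokens : Int) : String :=
  if estTokens content.toList ≤ max_tokens then content
  else
    let lines := PySem.Chars.splitlines content.toList
    let p := (PySem.List.enumerate lines).foldl stepA ([], [], 0)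
    let sections := if p.2.1 ≠ [] then p.1 ++ [(p.2.1, p.2.2, (lines.length : Int))] else p.1
    String.ofList (PySem.Chars.join ("\n".toList) (truncA max_tokens pyTruncationOrder lines sections).1)

-- ===== PORT B =====
-- pass 1 loop body of B: state (blocks, name, block)
def stepB (st : List (List Char × List (List Char)) × List Char × List (List Char))
    (line : List Char) : List (List Char × List (List Char)) × List Char × List (List Char) :=
  let ls := PySem.Chars.strip line
  if PySem.Chars.startswith ls ("## ".toList) then
    (st.1 ++ [(st.2.1, st.2.2)],
     PySem.Chars.lower (PySem.Chars.strip (PySem.List.slice ls (some 3) none)),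
     [line])
  else (st.1, st.2.1, st.2.2 ++ [line])

-- sum(len(l.split()) for l in ls)
def wcB (ls : List (List Char)) : Int :=
  (ls.map (fun l => ((PySem.Chars.split₀ l).length : Int))).sum

-- inner loop of pass 2: first block not yet dropped whose name contains the target
def findB (dropped : PySem.Set (List Char)) (target : List Char) :
    List (List Char × List (List Char)) → Option (List Char × Int)
  | [] => none
  | b :: bs =>
    if ¬ PySem.Set.contains dropped b.1 ∧ PySem.Chars.isIn target b.1
    then some (b.1, wcB b.2) else findB dropped target bs

-- pass 2: the drop schedule (name, word count), budget not consulted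
def schedB (blocks : List (List Char × List (List Char))) :
    List (List Char) → PySem.Set (List Char) → List (List Char × Int)
  | [], _ => []
  | t :: ts, dropped =>
    match findB dropped t blocks with
    | none => schedB blocks ts dropped
    | some (n, w) => (n, w) :: schedB blocks ts (PySem.Set.add dropped n)

-- pass 3: word arithmetic decides how many scheduled drops are needed
def dropsB (max_tokens : Int) :
    List (List Char × Int) → Int → PySem.Set (List Char) → PySem.Set (List Char)
  | [], _, need => need
  | nw :: rest, words, need =>
    if PySem.Int.floordiv (words * 4) 3 ≤ max_tokens then need
    else dropsB max_tokens rest (words - nw.2) (PySem.Set.add need nw.1)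

-- the lines of a block list, in order (pass-4 comprehension body)
def blkLines (bs : List (List Char × List (List Char))) : List (List Char) :=
  (bs.map Prod.snd).flatten

def enforce_token_budget_py_alt (content : String) (max_tokens : Int) : String :=
  if estTokens content.toList ≤ max_tokens then content
  else
    let st := (PySem.Chars.splitlines content.toList).foldl stepB ([], [], [])
    let blocks := st.1 ++ [(st.2.1, st.2.2)]
    let schedule := schedB blocks pyTruncationOrder PySem.Set.empty
    let words := (blocks.map (fun b => wcB b.2)).sum
    let need := dropsB max_tokens schedule words PySem.Set.empty
    String.ofList (PySem.Chars.join ("\n".toList)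
      (blkLines (blocks.filter (fun b => ! PySem.Set.contains need b.1))))

-- ===== PRECONDITION & SPEC =====
-- the (nonempty, lowercased) '## ' header names of the content, in order
def headerNames (content : String) : List (List Char) :=
  (PySem.Chars.splitlines content.toList).filterMap (fun line =>
    let ls := PySem.Chars.strip line
    if PySem.Chars.startswith ls ("## ".toList) then
      (let n := PySem.Chars.lower (PySem.Chars.strip (PySem.List.slice ls (some 3) none))
       if n ≠ [] then some n else none)
    else none)

-- Pre_ excludes contents with two '## ' sections of equal (case-insensitive) name: there A's
-- reindexing comprehension silently drops every same-named section from its tracking list after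
-- the first removal, an accidental tie-like corner no caller specifies; B drops at most one
-- block per scheduled name.
def Pre_enforce_token_budget_py (content : String) (max_tokens : Int) : Prop :=
  (headerNames content).Nodup

instance (content : String) (max_tokens : Int) :
    Decidable (Pre_enforce_token_budget_py content max_tokens) := by
  unfold Pre_enforce_token_budget_py; infer_instance

def pvWitness_enforce_token_budget_py : String × Int := ("## trend\na b c d\n## on track\ne f", 2)

def Spec_enforce_token_budget_py (content : String) (max_tokens : Int) (out : String) : Prop :=
  out = enforce_token_budget_py_alt content max_tokens
instance (content : String) (max_tokens : Int) (out : String) :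
    Decidable (Spec_enforce_token_budget_py content max_tokens out) := by
  unfold Spec_enforce_token_budget_py; infer_instance

-- ===== CLAIM (what is proved, stated in full; the proofs are below) =====
def Claim_equal_enforce_token_budget_py : Prop :=
  ∀ (content : String) (max_tokens : Int), Dom_enforce_token_budget_py content max_tokens →
    Pre_enforce_token_budget_py content max_tokens →
    Spec_enforce_token_budget_py content max_tokens (enforce_token_budget_py content max_tokens)


-- ===== LEMMAS AND PROOFS =====

-- ---- proof-side greedy on blocks: the intermediate between A's splicing and B's staged passes ----
def removeFirstBlk (target : List Char) :
    List (List Char × List (List Char)) → List (List Char × List (List Char))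
  | [] => []
  | b :: bs => if PySem.Chars.isIn target b.1 then bs else b :: removeFirstBlk target bs

def greedyB (max_tokens : Int) : List (List Char) →
    List (List Char × List (List Char)) → List (List Char × List (List Char))
  | [], blocks => blocks
  | t :: ts, blocks =>
    if estTokens (PySem.Chars.join ("\n".toList) (blkLines blocks)) ≤ max_tokens then blocks
    else greedyB max_tokens ts (removeFirstBlk t blocks)

-- proof-side view: total line count of a block list, its sections as A sees them, its nonempty names
def nLines (bs : List (List Char × List (List Char))) : Nat :=
  (bs.map (fun b => b.2.length)).sum

def secsFrom (off : Nat) : List (List Char × List (List Char)) → List (List Char × Int × Int)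
  | [] => []
  | b :: bs =>
    (if b.1 ≠ [] then [(b.1, (off : Int), ((off + b.2.length : Nat) : Int))] else [])
      ++ secsFrom (off + b.2.length) bs

def namesNE (bs : List (List Char × List (List Char))) : List (List Char) :=
  (bs.map Prod.fst).filter (fun n => n ≠ [])

def hnames (lines : List (List Char)) : List (List Char) :=
  lines.filterMap (fun line =>
    let ls := PySem.Chars.strip line
    if PySem.Chars.startswith ls ("## ".toList) then
      (let n := PySem.Chars.lower (PySem.Chars.strip (PySem.List.slice ls (some 3) none))
       if n ≠ [] then some n else none)
    else none)

lemma headerNames_eq (content : String) :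
    headerNames content = hnames (PySem.Chars.splitlines content.toList) := rfl

lemma blkLines_append (xs ys : List (List Char × List (List Char))) :
    blkLines (xs ++ ys) = blkLines xs ++ blkLines ys := by
  simp [blkLines]

lemma length_blkLines (bs : List (List Char × List (List Char))) :
    (blkLines bs).length = nLines bs := by
  simp only [blkLines, nLines, List.length_flatten, List.map_map]
  rfl

lemma nLines_cons (b : List Char × List (List Char)) (bs : List (List Char × List (List Char))) :
    nLines (b :: bs) = b.2.length + nLines bs := by simp [nLines]

lemma namesNE_append (xs ys : List (List Char × List (List Char))) :
    namesNE (xs ++ ys) = namesNE xs ++ namesNE ys := by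
  simp [namesNE]

lemma secsFrom_append (xs ys : List (List Char × List (List Char))) (off : Nat) :
    secsFrom off (xs ++ ys) = secsFrom off xs ++ secsFrom (off + nLines xs) ys := by
  induction xs generalizing off with
  | nil => simp [secsFrom, nLines]
  | cons b bs ih => simp [secsFrom, ih, nLines, List.append_assoc, Nat.add_assoc]

lemma mem_secsFrom {sec : List Char × Int × Int}
    {bs : List (List Char × List (List Char))} {off : Nat} (h : sec ∈ secsFrom off bs) :
    sec.1 ∈ namesNE bs ∧ (off : Int) ≤ sec.2.1 ∧ sec.2.1 ≤ sec.2.2 ∧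
      sec.2.2 ≤ ((off + nLines bs : Nat) : Int) := by
  induction bs generalizing off with
  | nil => simp [secsFrom] at h
  | cons b bs ih =>
    simp only [secsFrom, List.mem_append] at h
    rcases h with h | h
    · by_cases hb : b.1 = []
      · simp [hb] at h
      · simp [hb] at h
        subst h
        refine ⟨by simp [namesNE, hb], by simp, by push_cast; omega, ?_⟩
        have : off + b.2.length ≤ off + nLines (b :: bs) := by rw [nLines_cons]; omega
        simpa using (Nat.cast_le (α := Int)).mpr this
    · obtain ⟨h1, h2, h3, h4⟩ := ih h
      refine ⟨by simp [namesNE] at h1 ⊢; tauto, by push_cast at h2 ⊢; omega, h3, ?_⟩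
      have heq : off + b.2.length + nLines bs = off + nLines (b :: bs) := by rw [nLines_cons]; omega
      rw [heq] at h4
      exact h4

lemma secsFrom_shift (r : Nat) (bs : List (List Char × List (List Char))) (off : Nat) :
    (secsFrom (off + r) bs).map (fun sec => (sec.1, sec.2.1 - (r : Int), sec.2.2 - (r : Int)))
      = secsFrom off bs := by
  induction bs generalizing off with
  | nil => simp [secsFrom]
  | cons b bs ih =>
    have h2 := ih (off + b.2.length)
    have h3 : off + r + b.2.length = off + b.2.length + r := by omega
    by_cases hb : b.1 = []
    · simp [secsFrom, hb, h3, h2]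
    · simp only [secsFrom, hb, if_pos, List.map_append, h3, h2, ne_eq, not_false_iff, List.map_cons, List.map_nil]
      push_cast
      simp

lemma isIn_ne_nil {t n : List Char} (h : PySem.Chars.isIn t n = true) (ht : t ≠ []) : n ≠ [] := by
  rw [PySem.Chars.isIn_iff_infix] at h
  rintro rfl
  exact ht (List.infix_nil.mp h)

lemma removeFirstBlk_id {t : List Char} {bs : List (List Char × List (List Char))}
    (h : ∀ b ∈ bs, PySem.Chars.isIn t b.1 = false) : removeFirstBlk t bs = bs := by
  induction bs with
  | nil => rfl
  | cons b bs ih => simp [removeFirstBlk, h b (by simp), ih (fun x hx => h x (by simp [hx]))]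

lemma findSecA_eq_none {t : List Char} {secs : List (List Char × Int × Int)}
    (h : ∀ sec ∈ secs, PySem.Chars.isIn t sec.1 = false) : findSecA t secs = none := by
  induction secs with
  | nil => rfl
  | cons s ss ih => simp [findSecA, h s (by simp), ih (fun x hx => h x (by simp [hx]))]

lemma findSecA_append_none {t : List Char} {s1 s2 : List (List Char × Int × Int)}
    (h : ∀ sec ∈ s1, PySem.Chars.isIn t sec.1 = false) :
    findSecA t (s1 ++ s2) = findSecA t s2 := by
  induction s1 with
  | nil => rfl
  | cons s ss ih => simp [findSecA, h s (by simp), ih (fun x hx => h x (by simp [hx]))]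

lemma first_split {t : List Char} {bs : List (List Char × List (List Char))}
    (h : ¬ ∀ b ∈ bs, PySem.Chars.isIn t b.1 = false) :
    ∃ l1 b l2, bs = l1 ++ b :: l2 ∧ PySem.Chars.isIn t b.1 = true ∧
      ∀ x ∈ l1, PySem.Chars.isIn t x.1 = false := by
  induction bs with
  | nil => simp at h
  | cons b bs ih =>
    by_cases hb : PySem.Chars.isIn t b.1 = true
    · exact ⟨[], b, bs, by simp, hb, by simp⟩
    · have hb' : PySem.Chars.isIn t b.1 = false := by simpa using hb
      have : ¬ ∀ x ∈ bs, PySem.Chars.isIn t x.1 = false := by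
        intro hall; exact h (by intro x hx; rcases List.mem_cons.mp hx with rfl | hx; exact hb'; exact hall x hx)
      obtain ⟨l1, c, l2, rfl, hc, hl1⟩ := ih this
      exact ⟨b :: l1, c, l2, by simp, hc, by
        intro x hx; rcases List.mem_cons.mp hx with rfl | hx; exact hb'; exact hl1 x hx⟩

-- the parse folds of A and B run in lockstep
lemma parse_loop (lines : List (List Char)) :
    ∀ (blocks : List (List Char × List (List Char))) (curN : List Char) (curL : List (List Char)),
    (∀ b ∈ blocks, b.1 ≠ [] → b.2 ≠ []) → (curN ≠ [] → curL ≠ []) →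
    let a := (PySem.List.enumerate lines ((nLines blocks + curL.length : Nat) : Int)).foldl stepA
      (secsFrom 0 blocks, curN, ((nLines blocks : Nat) : Int))
    let b := lines.foldl stepB (blocks, curN, curL)
    a.1 = secsFrom 0 b.1 ∧ a.2.1 = b.2.1 ∧ a.2.2 = ((nLines b.1 : Nat) : Int) ∧
    nLines b.1 + b.2.2.length = nLines blocks + curL.length + lines.length ∧
    blkLines b.1 ++ b.2.2 = blkLines blocks ++ curL ++ lines ∧
    namesNE b.1 ++ (if b.2.1 ≠ [] then [b.2.1] else [])
      = namesNE blocks ++ (if curN ≠ [] then [curN] else []) ++ hnames lines ∧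
    (∀ x ∈ b.1, x.1 ≠ [] → x.2 ≠ []) ∧ (b.2.1 ≠ [] → b.2.2 ≠ []) := by
  induction lines with
  | nil =>
    intro blocks curN curL hgood hcur
    refine ⟨rfl, rfl, rfl, by simp, by simp, by simp [hnames], hgood, hcur⟩
  | cons l ls ih =>
    intro blocks curN curL hgood hcur
    rw [PySem.List.enumerate_cons, List.foldl_cons, List.foldl_cons]
    by_cases hh : PySem.Chars.startswith (PySem.Chars.strip l) ("## ".toList) = true
    · -- header line: a new block starts
      set nm := PySem.Chars.lower (PySem.Chars.strip
        (PySem.List.slice (PySem.Chars.strip l) (some 3) none)) with hnm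
      have hstepA : stepA (secsFrom 0 blocks, curN, ((nLines blocks : Nat) : Int))
            (((nLines blocks + curL.length : Nat) : Int), l)
          = (secsFrom 0 (blocks ++ [(curN, curL)]), nm,
             ((nLines (blocks ++ [(curN, curL)]) : Nat) : Int)) := by
        simp only [stepA, hh, if_true, hnm]
        have h1 : nLines (blocks ++ [(curN, curL)]) = nLines blocks + curL.length := by
          simp [nLines]
        rw [secsFrom_append, h1]
        by_cases hc : curN = []
        · simp [hc, secsFrom]
        · simp [hc, secsFrom]
      have hstepB : stepB (blocks, curN, curL) l = (blocks ++ [(curN, curL)], nm, [l]) := by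
        simp only [stepB, hh, if_true, hnm]
      rw [hstepA, hstepB]
      have hstart : ((nLines blocks + curL.length : Nat) : Int) + 1
          = ((nLines (blocks ++ [(curN, curL)]) + ([l] : List (List Char)).length : Nat) : Int) := by
        have : nLines (blocks ++ [(curN, curL)]) = nLines blocks + curL.length := by
          simp [nLines]
        rw [this]
        simp only [List.length_cons, List.length_nil]
        push_cast
        omega
      rw [hstart]
      have hgood' : ∀ x ∈ blocks ++ [(curN, curL)], x.1 ≠ [] → x.2 ≠ [] := by
        intro x hx
        rcases List.mem_append.mp hx with h | h
        · exact hgood x h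
        · simp at h
          subst h
          exact hcur
      obtain ⟨c1, c2, c3, c4, c5, c6, c7, c8⟩ := ih (blocks ++ [(curN, curL)]) nm [l] hgood'
        (fun _ => by simp)
      refine ⟨c1, c2, c3, ?_, ?_, ?_, c7, c8⟩
      · rw [c4]
        simp [nLines]
        omega
      · rw [c5, blkLines_append]
        simp [blkLines]
      · rw [c6, namesNE_append]
        have hl : hnames (l :: ls) = (if nm ≠ [] then [nm] else []) ++ hnames ls := by
          simp only [hnames, List.filterMap_cons, hh, if_true]
          rw [← hnm]
          by_cases hn : nm = [] <;> simp [hn]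
        rw [hl]
        by_cases hc : curN = [] <;> by_cases hn : nm = [] <;> simp [namesNE, hc, hn]
    · -- ordinary line: it joins the current block
      have hh' : PySem.Chars.startswith (PySem.Chars.strip l) ("## ".toList) = false := by
        simpa using hh
      have hstepA : stepA (secsFrom 0 blocks, curN, ((nLines blocks : Nat) : Int))
            (((nLines blocks + curL.length : Nat) : Int), l)
          = (secsFrom 0 blocks, curN, ((nLines blocks : Nat) : Int)) := by
        simp only [stepA, hh']
        simp
      have hstepB : stepB (blocks, curN, curL) l = (blocks, curN, curL ++ [l]) := by
        simp only [stepB, hh']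
        simp
      rw [hstepA, hstepB]
      have hstart : ((nLines blocks + curL.length : Nat) : Int) + 1
          = ((nLines blocks + (curL ++ [l]).length : Nat) : Int) := by
        simp only [List.length_append, List.length_cons, List.length_nil]
        push_cast
        omega
      rw [hstart]
      obtain ⟨c1, c2, c3, c4, c5, c6, c7, c8⟩ := ih blocks curN (curL ++ [l]) hgood
        (fun _ => by simp)
      refine ⟨c1, c2, c3, ?_, ?_, ?_, c7, c8⟩
      · rw [c4]; simp; omega
      · rw [c5]; simp
      · rw [c6]
        have hl : hnames (l :: ls) = hnames ls := by
          have hh2 : PySem.Chars.startswith (PySem.Chars.strip l) ['#', '#', ' '] = false := hh'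
          simp [hnames, hh2]
        rw [hl]

lemma blkLines_cons (b : List Char × List (List Char)) (bs : List (List Char × List (List Char))) :
    blkLines (b :: bs) = b.2 ++ blkLines bs := by simp [blkLines]

lemma mem_of_mem_namesNE {n : List Char} {bs : List (List Char × List (List Char))}
    (h : n ∈ namesNE bs) : ∃ b ∈ bs, n = b.1 := by
  simp only [namesNE, List.mem_filter, List.mem_map] at h
  obtain ⟨⟨b, hb, rfl⟩, -⟩ := h
  exact ⟨b, hb, rfl⟩

lemma namesNE_cons (b : List Char × List (List Char)) (bs : List (List Char × List (List Char))) :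
    namesNE (b :: bs) = (if b.1 ≠ [] then [b.1] else []) ++ namesNE bs := by
  by_cases hb : b.1 = [] <;> simp [namesNE, hb]

lemma removeFirstBlk_append_first {t : List Char} {l1 l2 : List (List Char × List (List Char))}
    {b : List Char × List (List Char)} (hl1 : ∀ x ∈ l1, PySem.Chars.isIn t x.1 = false)
    (hb : PySem.Chars.isIn t b.1 = true) :
    removeFirstBlk t (l1 ++ b :: l2) = l1 ++ l2 := by
  induction l1 with
  | nil => simp [removeFirstBlk, hb]
  | cons x xs ih =>
    simp [removeFirstBlk, hl1 x (by simp), ih (fun y hy => hl1 y (by simp [hy]))]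

-- one truncation step and the whole target loop of A run in lockstep with the greedy block loop
lemma trunc_rel (mt : Int) : ∀ (ts : List (List Char)) (bs : List (List Char × List (List Char))),
    (∀ t ∈ ts, t ≠ []) → (namesNE bs).Nodup → (∀ b ∈ bs, b.1 ≠ [] → b.2 ≠ []) →
    truncA mt ts (blkLines bs) (secsFrom 0 bs)
      = (blkLines (greedyB mt ts bs), secsFrom 0 (greedyB mt ts bs)) := by
  intro ts
  induction ts with
  | nil => intro bs _ _ _; simp [truncA, greedyB]
  | cons t ts ih =>
    intro bs hts hnd hgood
    have ht : t ≠ [] := hts t (by simp)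
    have hts' : ∀ x ∈ ts, x ≠ [] := fun x hx => hts x (by simp [hx])
    by_cases hbud : estTokens (PySem.Chars.join ("\n".toList) (blkLines bs)) ≤ mt
    · simp only [truncA, greedyB, if_pos hbud]
    · by_cases hm : ∀ b ∈ bs, PySem.Chars.isIn t b.1 = false
      · have h1 : findSecA t (secsFrom 0 bs) = none := by
          apply findSecA_eq_none
          intro sec hsec
          obtain ⟨b, hb, heq⟩ := mem_of_mem_namesNE (mem_secsFrom hsec).1
          rw [heq]; exact hm b hb
        simp only [truncA, greedyB, if_neg hbud, h1, removeFirstBlk_id hm]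
        exact ih bs hts' hnd hgood
      · obtain ⟨l1, b, l2, rfl, hmatch, hl1⟩ := first_split hm
        have hb1ne : b.1 ≠ [] := isIn_ne_nil hmatch ht
        have hbne : b.2 ≠ [] := hgood b (by simp) hb1ne
        have hLb : 1 ≤ b.2.length := List.length_pos_iff.mpr hbne
        -- names split
        have hnames : namesNE (l1 ++ b :: l2) = namesNE l1 ++ b.1 :: namesNE l2 := by
          rw [namesNE_append, namesNE_cons]; simp [hb1ne]
        rw [hnames] at hnd
        rcases List.nodup_append.mp hnd with ⟨hnd1, hnd2, hdisj⟩
        have hb1notl1 : b.1 ∉ namesNE l1 := fun hmem => hdisj b.1 hmem b.1 (by simp) rfl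
        have hb1notl2 : b.1 ∉ namesNE l2 := (List.nodup_cons.mp hnd2).1
        -- sections split
        have hsecs : secsFrom 0 (l1 ++ b :: l2)
            = secsFrom 0 l1 ++ ((b.1, (nLines l1 : Int), ((nLines l1 + b.2.length : Nat) : Int))
                :: secsFrom (nLines l1 + b.2.length) l2) := by
          rw [secsFrom_append]
          simp [secsFrom, hb1ne]
        -- find hits b's section
        have hfind : findSecA t (secsFrom 0 (l1 ++ b :: l2))
            = some (b.1, (nLines l1 : Int), ((nLines l1 + b.2.length : Nat) : Int)) := by
          rw [hsecs, findSecA_append_none, findSecA]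
          · simp [hmatch]
          · intro sec hsec
            obtain ⟨x, hx, heq⟩ := mem_of_mem_namesNE (mem_secsFrom hsec).1
            rw [heq]; exact hl1 x hx
        -- the spliced line list is the flatten of the remaining blocks
        have hlines : PySem.List.slice (blkLines (l1 ++ b :: l2)) none (some ((nLines l1 : Nat) : Int))
              ++ PySem.List.slice (blkLines (l1 ++ b :: l2)) (some ((nLines l1 + b.2.length : Nat) : Int)) none
            = blkLines (l1 ++ l2) := by
          rw [PySem.List.slice_to_natCast, PySem.List.slice_from_natCast]
          rw [blkLines_append, blkLines_cons, blkLines_append]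
          have h1 : (blkLines l1).length = nLines l1 := length_blkLines l1
          have h2 : (blkLines l1 ++ b.2).length = nLines l1 + b.2.length := by
            simp [length_blkLines l1]
          rw [List.take_left' h1, ← List.append_assoc, List.drop_left' h2]
        -- the filtered, reindexed sections are the sections of the remaining blocks
        have hsecs' :
            ((secsFrom 0 (l1 ++ b :: l2)).filter (fun sec => sec.1 ≠ b.1)).map
              (fun sec => (sec.1,
                if sec.2.1 > (nLines l1 : Int) then sec.2.1 - (((nLines l1 + b.2.length : Nat) : Int) - (nLines l1 : Int)) else sec.2.1,
                if sec.2.2 > (nLines l1 : Int) then sec.2.2 - (((nLines l1 + b.2.length : Nat) : Int) - (nLines l1 : Int)) else sec.2.2))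
            = secsFrom 0 (l1 ++ l2) := by
          have hfS1 : (secsFrom 0 l1).filter (fun sec => decide (sec.1 ≠ b.1)) = secsFrom 0 l1 := by
            apply List.filter_eq_self.mpr
            intro sec hsec
            simp only [ne_eq, decide_eq_true_eq]
            intro hcon
            exact hb1notl1 (hcon ▸ (mem_secsFrom hsec).1)
          have hfS2 : (secsFrom (nLines l1 + b.2.length) l2).filter (fun sec => decide (sec.1 ≠ b.1))
              = secsFrom (nLines l1 + b.2.length) l2 := by
            apply List.filter_eq_self.mpr
            intro sec hsec
            simp only [ne_eq, decide_eq_true_eq]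
            intro hcon
            exact hb1notl2 (hcon ▸ (mem_secsFrom hsec).1)
          have hcons : ((b.1, (nLines l1 : Int), ((nLines l1 + b.2.length : Nat) : Int))
                :: secsFrom (nLines l1 + b.2.length) l2).filter (fun sec => decide (sec.1 ≠ b.1))
              = (secsFrom (nLines l1 + b.2.length) l2).filter (fun sec => decide (sec.1 ≠ b.1)) := by
            rw [List.filter_cons]
            simp
          have hmapS1 : (secsFrom 0 l1).map
              (fun sec => (sec.1,
                if sec.2.1 > (nLines l1 : Int) then sec.2.1 - (((nLines l1 + b.2.length : Nat) : Int) - (nLines l1 : Int)) else sec.2.1,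
                if sec.2.2 > (nLines l1 : Int) then sec.2.2 - (((nLines l1 + b.2.length : Nat) : Int) - (nLines l1 : Int)) else sec.2.2))
              = secsFrom 0 l1 := by
            have hid : ∀ sec ∈ secsFrom 0 l1,
                (sec.1,
                  if sec.2.1 > (nLines l1 : Int) then sec.2.1 - (((nLines l1 + b.2.length : Nat) : Int) - (nLines l1 : Int)) else sec.2.1,
                  if sec.2.2 > (nLines l1 : Int) then sec.2.2 - (((nLines l1 + b.2.length : Nat) : Int) - (nLines l1 : Int)) else sec.2.2)
                = id sec := by
              intro sec hsec
              obtain ⟨-, hs1, hs2, hs3⟩ := mem_secsFrom hsec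
              have hb1 : ¬ ((nLines l1 : Int) < sec.2.1) := by push_cast at hs1 hs2 hs3 ⊢; omega
              have hb2 : ¬ ((nLines l1 : Int) < sec.2.2) := by push_cast at hs1 hs2 hs3 ⊢; omega
              simp [hb1, hb2]
            rw [List.map_congr_left hid, List.map_id]
          have hmapS2 : (secsFrom (nLines l1 + b.2.length) l2).map
              (fun sec => (sec.1,
                if sec.2.1 > (nLines l1 : Int) then sec.2.1 - (((nLines l1 + b.2.length : Nat) : Int) - (nLines l1 : Int)) else sec.2.1,
                if sec.2.2 > (nLines l1 : Int) then sec.2.2 - (((nLines l1 + b.2.length : Nat) : Int) - (nLines l1 : Int)) else sec.2.2))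
              = secsFrom (nLines l1) l2 := by
            rw [← secsFrom_shift b.2.length l2 (nLines l1)]
            apply List.map_congr_left
            intro sec hsec
            obtain ⟨-, hs1, hs2, hs3⟩ := mem_secsFrom hsec
            have hb1 : (nLines l1 : Int) < sec.2.1 := by push_cast at hs1 ⊢; omega
            have hb2 : (nLines l1 : Int) < sec.2.2 := by push_cast at hs1 hs2 ⊢; omega
            simp [hb1, hb2]
          rw [hsecs, List.filter_append, hcons, hfS1, hfS2, List.map_append, hmapS1, hmapS2,
            secsFrom_append]
          simp
        -- assemble the step, then recurse
        have hgood' : ∀ x ∈ l1 ++ l2, x.1 ≠ [] → x.2 ≠ [] := by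
          intro x hx
          exact hgood x (by rcases List.mem_append.mp hx with h | h <;> simp [h])
        have hnd' : (namesNE (l1 ++ l2)).Nodup := by
          rw [namesNE_append]
          exact List.nodup_append.mpr ⟨hnd1, (List.nodup_cons.mp hnd2).2,
            fun a ha c hc => hdisj a ha c (by simp [hc])⟩
        have hrm := removeFirstBlk_append_first (l2 := l2) hl1 hmatch
        simp only [truncA, greedyB, if_neg hbud, hfind, hrm]
        rw [hlines, hsecs']
        exact ih (l1 ++ l2) hts' hnd' hgood'

-- ---- words of a '\n'-join are the words of the parts (split₀.go characterisations) ----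
lemma go_nil (cur : List Char) (acc : List (List Char)) :
    PySem.Chars.split₀.go [] cur acc
      = if cur.isEmpty then acc.reverse else (cur.reverse :: acc).reverse := rfl

lemma go_cons (c : Char) (rest cur : List Char) (acc : List (List Char)) :
    PySem.Chars.split₀.go (c :: rest) cur acc
      = if PySem.Chars.isspace c then
          (if cur.isEmpty then PySem.Chars.split₀.go rest [] acc
           else PySem.Chars.split₀.go rest [] (cur.reverse :: acc))
        else PySem.Chars.split₀.go rest (c :: cur) acc := rfl

lemma go_state (s : List Char) : ∀ (cur : List Char) (acc : List (List Char)),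
    PySem.Chars.split₀.go s cur acc = acc.reverse ++ PySem.Chars.split₀.go s cur [] := by
  induction s with
  | nil =>
    intro cur acc
    rw [go_nil, go_nil]
    by_cases hc : cur.isEmpty <;> simp [hc]
  | cons c rest ih =>
    intro cur acc
    rw [go_cons, go_cons]
    by_cases hs : PySem.Chars.isspace c
    · by_cases hc : cur.isEmpty
      · simp only [hs, hc, if_true]
        exact ih [] acc
      · simp only [hs, hc, if_true]
        rw [ih [] (cur.reverse :: acc), ih [] [cur.reverse]]
        simp
    · simp only [hs]
      exact ih (c :: cur) acc

lemma go_split (b : List Char) : ∀ (a : List Char) (cur : List Char) (acc : List (List Char)),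
    PySem.Chars.split₀.go (a ++ '\n' :: b) cur acc
      = PySem.Chars.split₀.go a cur acc ++ PySem.Chars.split₀ b := by
  intro a
  induction a with
  | nil =>
    intro cur acc
    have hs : PySem.Chars.isspace '\n' = true := by decide
    rw [List.nil_append, go_cons, go_nil]
    by_cases hc : cur.isEmpty
    · simp only [hs, hc, if_true]
      rw [go_state b [] acc]
      rfl
    · simp only [hs, hc, if_true]
      rw [go_state b [] (cur.reverse :: acc)]
      simp [PySem.Chars.split₀]
  | cons c a' ih =>
    intro cur acc
    rw [List.cons_append, go_cons, go_cons]
    by_cases hs : PySem.Chars.isspace c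
    · by_cases hc : cur.isEmpty
      · simp only [hs, hc, if_true]
        exact ih [] acc
      · simp only [hs, hc, if_true]
        exact ih [] (cur.reverse :: acc)
    · simp only [hs]
      exact ih (c :: cur) acc

lemma split₀_append_nl (a b : List Char) :
    PySem.Chars.split₀ (a ++ '\n' :: b) = PySem.Chars.split₀ a ++ PySem.Chars.split₀ b := by
  show PySem.Chars.split₀.go (a ++ '\n' :: b) [] [] = _
  rw [go_split]
  rfl

lemma split₀_join (ls : List (List Char)) :
    PySem.Chars.split₀ (PySem.Chars.join ("\n".toList) ls)
      = (ls.map PySem.Chars.split₀).flatten := by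
  induction ls with
  | nil => simp [PySem.Chars.join_nil, PySem.Chars.split₀, go_nil]
  | cons x ls ih =>
    cases ls with
    | nil => simp [PySem.Chars.join_singleton]
    | cons y r =>
      rw [PySem.Chars.join_cons_cons]
      have hx : x ++ "\n".toList ++ PySem.Chars.join ("\n".toList) (y :: r)
          = x ++ '\n' :: PySem.Chars.join ("\n".toList) (y :: r) := by
        rw [List.append_assoc]
        rfl
      rw [hx, split₀_append_nl, ih]
      simp

-- the word sum of a block list
def wsum (bs : List (List Char × List (List Char))) : Int :=
  (bs.map (fun b => wcB b.2)).sum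

lemma estTokens_blkLines (bs : List (List Char × List (List Char))) :
    estTokens (PySem.Chars.join ("\n".toList) (blkLines bs))
      = PySem.Int.floordiv (wsum bs * 4) 3 := by
  unfold estTokens
  rw [split₀_join]
  congr 2
  unfold wsum wcB blkLines
  induction bs with
  | nil => simp
  | cons b bs ih =>
    simp only [List.map_cons, List.flatten_cons, List.map_append, List.length_flatten,
      List.sum_cons, List.map_map] at *
    push_cast at *
    rw [← ih]
    simp [Function.comp]
    induction b.2 with
    | nil => simp
    | cons l ls ihl => simp at *; push_cast; omega

lemma dropsB_cons (mt : Int) (nw : List Char × Int) (r : List (List Char × Int)) (w : Int)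
    (need : PySem.Set (List Char)) :
    dropsB mt (nw :: r) w need
      = if PySem.Int.floordiv (w * 4) 3 ≤ mt then need
        else dropsB mt r (w - nw.2) (PySem.Set.add need nw.1) := rfl

-- dropsB returns its accumulator unchanged when the budget is already met
lemma dropsB_fit {mt w : Int} {l : List (List Char × Int)} {need : PySem.Set (List Char)}
    (h : PySem.Int.floordiv (w * 4) 3 ≤ mt) : dropsB mt l w need = need := by
  cases l with
  | nil => rfl
  | cons nw r => rw [dropsB_cons, if_pos h]

-- dropsB only adds
lemma mem_dropsB {mt : Int} {x : List Char} :
    ∀ (l : List (List Char × Int)) (w : Int) (need : PySem.Set (List Char)),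
    x ∈ need → x ∈ dropsB mt l w need := by
  intro l
  induction l with
  | nil => intro w need h; exact h
  | cons nw r ih =>
    intro w need h
    rw [dropsB_cons]
    by_cases hb : PySem.Int.floordiv (w * 4) 3 ≤ mt
    · rw [if_pos hb]; exact h
    · rw [if_neg hb]
      exact ih _ _ ((PySem.Set.mem_add _ _ _).mpr (Or.inl h))

-- findB unfolding
lemma findB_cons (dropped : PySem.Set (List Char)) (t : List Char)
    (b : List Char × List (List Char)) (bs : List (List Char × List (List Char))) :
    findB dropped t (b :: bs)
      = if ¬ PySem.Set.contains dropped b.1 ∧ PySem.Chars.isIn t b.1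
        then some (b.1, wcB b.2) else findB dropped t bs := rfl

lemma findB_first {dropped : PySem.Set (List Char)} {t : List Char}
    {l1 l2 : List (List Char × List (List Char))} {b : List Char × List (List Char)}
    (hdisj : ∀ x ∈ l1 ++ b :: l2, x.1 ∉ dropped)
    (hl1 : ∀ x ∈ l1, PySem.Chars.isIn t x.1 = false) (hb : PySem.Chars.isIn t b.1 = true) :
    findB dropped t (l1 ++ b :: l2) = some (b.1, wcB b.2) := by
  induction l1 with
  | nil =>
    have hnc : ¬ PySem.Set.contains dropped b.1 = true := fun hc =>
      hdisj b (by simp) ((PySem.Set.contains_iff _ _).mp hc)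
    rw [List.nil_append, findB_cons, if_pos ⟨hnc, hb⟩]
  | cons x xs ih =>
    have hnx : PySem.Chars.isIn t x.1 = false := hl1 x (by simp)
    rw [List.cons_append, findB_cons, if_neg (fun hc => by rw [hnx] at hc; exact absurd hc.2 (by simp))]
    exact ih (fun y hy => hdisj y (by simp [hy])) (fun y hy => hl1 y (by simp [hy]))

lemma findB_none_of_nomatch {dropped : PySem.Set (List Char)} {t : List Char}
    {bs : List (List Char × List (List Char))}
    (hm : ∀ b ∈ bs, PySem.Chars.isIn t b.1 = false) : findB dropped t bs = none := by
  induction bs with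
  | nil => rfl
  | cons b bs ih =>
    rw [findB_cons, if_neg (fun hc => by rw [hm b (by simp)] at hc; exact absurd hc.2 (by simp))]
    exact ih (fun x hx => hm x (by simp [hx]))

-- a block whose name is already dropped is invisible to findB / schedB
lemma findB_skip {dropped : PySem.Set (List Char)} {t : List Char}
    {l1 l2 : List (List Char × List (List Char))} {b : List Char × List (List Char)}
    (hb : b.1 ∈ dropped) :
    findB dropped t (l1 ++ b :: l2) = findB dropped t (l1 ++ l2) := by
  induction l1 with
  | nil =>
    have hc : PySem.Set.contains dropped b.1 = true := (PySem.Set.contains_iff _ _).mpr hb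
    rw [List.nil_append, findB_cons, if_neg (fun hcond => hcond.1 hc), List.nil_append]
  | cons x xs ih =>
    rw [List.cons_append, List.cons_append, findB_cons, findB_cons, ih]

lemma schedB_skip {l1 l2 : List (List Char × List (List Char))}
    {b : List Char × List (List Char)} :
    ∀ (ts : List (List Char)) (dropped : PySem.Set (List Char)), b.1 ∈ dropped →
    schedB (l1 ++ b :: l2) ts dropped = schedB (l1 ++ l2) ts dropped := by
  intro ts
  induction ts with
  | nil => intro dropped _; rfl
  | cons t ts ih =>
    intro dropped hb
    simp only [schedB, findB_skip hb]
    cases hf : findB dropped t (l1 ++ l2) with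
    | none => exact ih dropped hb
    | some nw =>
      obtain ⟨n, w⟩ := nw
      show (n, w) :: schedB (l1 ++ b :: l2) ts (PySem.Set.add dropped n)
          = (n, w) :: schedB (l1 ++ l2) ts (PySem.Set.add dropped n)
      rw [ih (PySem.Set.add dropped n) ((PySem.Set.mem_add _ _ _).mpr (Or.inl hb))]

lemma mem_namesNE {bs : List (List Char × List (List Char))} {x : List Char × List (List Char)}
    (hx : x ∈ bs) (hne : x.1 ≠ []) : x.1 ∈ namesNE bs := by
  simp only [namesNE, List.mem_filter, List.mem_map]
  exact ⟨⟨x, hx, rfl⟩, by simp [hne]⟩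

-- ---- the bridge: the greedy block loop equals B's staged schedule + word arithmetic ----
lemma bridge (mt : Int) : ∀ (ts : List (List Char)) (bs : List (List Char × List (List Char)))
    (dropped : PySem.Set (List Char)),
    (∀ t ∈ ts, t ≠ []) → (namesNE bs).Nodup → (∀ b ∈ bs, b.1 ∉ dropped) →
    greedyB mt ts bs
      = bs.filter (fun b =>
          ! PySem.Set.contains (dropsB mt (schedB bs ts dropped) (wsum bs) dropped) b.1) := by
  intro ts
  induction ts with
  | nil =>
    intro bs dropped _ _ hdisj
    simp only [greedyB, schedB, dropsB]
    symm
    apply List.filter_eq_self.mpr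
    intro b hb
    simp only [Bool.not_eq_eq_eq_not, Bool.not_true, Bool.eq_false_iff, ne_eq]
    intro hc
    exact hdisj b hb ((PySem.Set.contains_iff _ _).mp hc)
  | cons t ts ih =>
    intro bs dropped hts hnd hdisj
    have ht : t ≠ [] := hts t (by simp)
    have hts' : ∀ x ∈ ts, x ≠ [] := fun x hx => hts x (by simp [hx])
    have hfit := estTokens_blkLines bs
    by_cases hbud : estTokens (PySem.Chars.join ("\n".toList) (blkLines bs)) ≤ mt
    · -- budget already met: greedy stops; dropsB stops at its first check
      have hb3 : PySem.Int.floordiv (wsum bs * 4) 3 ≤ mt := by rw [← hfit]; exact hbud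
      rw [greedyB, if_pos hbud, dropsB_fit hb3]
      symm
      apply List.filter_eq_self.mpr
      intro b hb
      simp only [Bool.not_eq_eq_eq_not, Bool.not_true, Bool.eq_false_iff, ne_eq]
      intro hc
      exact hdisj b hb ((PySem.Set.contains_iff _ _).mp hc)
    · have hb3 : ¬ PySem.Int.floordiv (wsum bs * 4) 3 ≤ mt := by rw [← hfit]; exact hbud
      by_cases hm : ∀ b ∈ bs, PySem.Chars.isIn t b.1 = false
      · -- no match for this target
        have hf : findB dropped t bs = none := findB_none_of_nomatch hm
        rw [greedyB, if_neg hbud, removeFirstBlk_id hm, schedB, hf]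
        exact ih bs dropped hts' hnd hdisj
      · obtain ⟨l1, b, l2, rfl, hmatch, hl1⟩ := first_split hm
        have hb1ne : b.1 ≠ [] := isIn_ne_nil hmatch ht
        have hnames : namesNE (l1 ++ b :: l2) = namesNE l1 ++ b.1 :: namesNE l2 := by
          rw [namesNE_append, namesNE_cons]; simp [hb1ne]
        have hnd' : (namesNE (l1 ++ l2)).Nodup := by
          rw [hnames] at hnd
          rcases List.nodup_append.mp hnd with ⟨hnd1, hnd2, hdisj2⟩
          rw [namesNE_append]
          exact List.nodup_append.mpr ⟨hnd1, (List.nodup_cons.mp hnd2).2,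
            fun a ha c hc => hdisj2 a ha c (by simp [hc])⟩
        have hb1not : b.1 ∉ namesNE l1 ∧ b.1 ∉ namesNE l2 := by
          rw [hnames] at hnd
          rcases List.nodup_append.mp hnd with ⟨-, hnd2, hdisj2⟩
          exact ⟨fun hmem => hdisj2 b.1 hmem b.1 (by simp) rfl, (List.nodup_cons.mp hnd2).1⟩
        have hfind := findB_first (t := t) hdisj hl1 hmatch
        -- names of remaining blocks differ from b.1 and stay outside dropped.add b.1
        have hdisj' : ∀ x ∈ l1 ++ l2, x.1 ∉ PySem.Set.add dropped b.1 := by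
          intro x hx
          rw [PySem.Set.mem_add]
          rintro (hin | heq)
          · exact hdisj x (by rcases List.mem_append.mp hx with h | h <;> simp [h]) hin
          · -- x.1 = b.1: impossible (nonempty names are distinct)
            have hx1ne : x.1 ≠ [] := heq ▸ hb1ne
            have : x.1 ∈ namesNE l1 ∨ x.1 ∈ namesNE l2 := by
              rcases List.mem_append.mp hx with h | h
              · exact Or.inl (mem_namesNE h hx1ne)
              · exact Or.inr (mem_namesNE h hx1ne)
            rcases this with h | h
            · exact hb1not.1 (heq ▸ h)
            · exact hb1not.2 (heq ▸ h)
        have hwsum : wsum (l1 ++ b :: l2) - wcB b.2 = wsum (l1 ++ l2) := by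
          simp [wsum]
          ring
        have hsched : schedB (l1 ++ b :: l2) ts (PySem.Set.add dropped b.1)
            = schedB (l1 ++ l2) ts (PySem.Set.add dropped b.1) :=
          schedB_skip ts _ ((PySem.Set.mem_add _ _ _).mpr (Or.inr rfl))
        rw [greedyB, if_neg hbud, removeFirstBlk_append_first hl1 hmatch, schedB, hfind]
        rw [dropsB_cons, if_neg hb3]
        rw [hwsum, hsched]
        rw [ih (l1 ++ l2) (PySem.Set.add dropped b.1) hts' hnd' hdisj']
        -- the filter removes b from the left-hand block list too
        set F := dropsB mt (schedB (l1 ++ l2) ts (PySem.Set.add dropped b.1)) (wsum (l1 ++ l2))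
          (PySem.Set.add dropped b.1) with hF
        have hbF : b.1 ∈ F := mem_dropsB _ _ _ ((PySem.Set.mem_add _ _ _).mpr (Or.inr rfl))
        simp [List.filter_append, hbF]

-- ===== VERDICT (by name: the statement is the Claim_ definition above) =====
theorem enforce_token_budget_py_spec : Claim_equal_enforce_token_budget_py := by
  intro content max_tokens _ hpre
  unfold Spec_enforce_token_budget_py
  unfold enforce_token_budget_py enforce_token_budget_py_alt
  by_cases hfit : estTokens content.toList ≤ max_tokens
  · simp [hfit]
  · rw [if_neg hfit, if_neg hfit]
    obtain ⟨c1, c2, c3, c4, c5, c6, c7, c8⟩ :=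
      parse_loop (PySem.Chars.splitlines content.toList) [] [] [] (by simp) (by simp)
    simp only [nLines, List.map_nil, List.sum_nil, List.length_nil, Nat.add_zero, Nat.cast_zero,
      secsFrom] at c1 c2 c3 c4
    simp only [blkLines, List.map_nil, List.flatten_nil, List.nil_append] at c5
    simp only [namesNE, List.map_nil, List.filter_nil, List.nil_append, ne_eq,
      not_true_eq_false, if_false] at c6
    rw [show (List.map (fun (b : List Char × List (List Char)) => b.2.length)
      (List.foldl stepB ([], [], []) (PySem.Chars.splitlines content.toList)).1).sum
      = nLines (List.foldl stepB ([], [], []) (PySem.Chars.splitlines content.toList)).1 from rfl] at c3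
    simp only []
    set L := PySem.Chars.splitlines content.toList with hL
    set pA := List.foldl stepA ([], [], 0) (PySem.List.enumerate L) with hpA
    set pB := List.foldl stepB ([], [], []) L with hpB
    set bsF := pB.1 ++ [(pB.2.1, pB.2.2)] with hbsF
    have hlines : blkLines bsF = L := by
      rw [hbsF, blkLines_append, blkLines_cons]
      simpa [blkLines] using c5
    have hlen : nLines pB.1 + pB.2.2.length = L.length := by simpa using c4
    have hsecs : (if pA.2.1 ≠ [] then pA.1 ++ [(pA.2.1, pA.2.2, (L.length : Int))] else pA.1)
        = secsFrom 0 bsF := by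
      rw [hbsF, secsFrom_append, c1, c2, c3]
      by_cases hc : pB.2.1 = []
      · simp [hc, secsFrom]
      · simp [hc, secsFrom, ← hlen]
    have hnames2 : namesNE bsF = hnames L := by
      rw [hbsF, namesNE_append]
      have h1 : namesNE [(pB.2.1, pB.2.2)] = if ¬ pB.2.1 = [] then [pB.2.1] else [] := by
        by_cases h : pB.2.1 = [] <;> simp [namesNE, h]
      rw [h1]
      simpa [namesNE] using c6
    have hnd : (namesNE bsF).Nodup := by
      unfold Pre_enforce_token_budget_py at hpre
      rw [headerNames_eq] at hpre
      rw [hnames2]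
      exact hpre
    have hgoodF : ∀ x ∈ bsF, x.1 ≠ [] → x.2 ≠ [] := by
      intro x hx
      rcases List.mem_append.mp hx with h | h
      · exact c7 x h
      · simp at h
        subst h
        exact c8
    have hdisj0 : ∀ b ∈ bsF, b.1 ∉ (PySem.Set.empty : PySem.Set (List Char)) := by
      intro b _ hmem
      simp [PySem.Set.empty] at hmem
    rw [hsecs, ← hlines, trunc_rel max_tokens pyTruncationOrder bsF (by decide) hnd hgoodF]
    rw [bridge max_tokens pyTruncationOrder bsF PySem.Set.empty (by decide) hnd hdisj0]
    rfl
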